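-- pv_equiv track=rewrite | github.com/sunilsoni/interview-notes-python | com/interview/2025/feb/visa/test1/directions.py | solution
-- ===== SOURCE A (Python) =====
-- def solution(matrix):
--     """
--     Finds the length of the longest diagonal segment that matches the pattern:
--     1, 2, 0, 2, 0, 2, ... and finishes at a matrix border.
--
--     Args:
--     matrix (list of list of int): 2D matrix with values 0, 1, or 2.
--
--     Returns:
--     int: The length of the longest valid diagonal segment.
--     """
--     if not matrix or not matrix[0]:
--         return 0
--
--     n = len(matrix)
--     m = len(matrix[0])
--
--     # Define the four diagonal directions: (dx, dy)
--     directions = [(1, 1), (1, -1), (-1, 1), (-1, -1)]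
--
--     def in_bounds(i, j):
--         return 0 <= i < n and 0 <= j < m
--
--     def is_border(i, j):
--         # Returns True if (i,j) is on the border (first/last row or first/last column)
--         return i == 0 or i == n - 1 or j == 0 or j == m - 1
--
--     def expected_value(pos):
--         # pos: the index in the segment (0-indexed)
--         if pos == 0:
--             return 1
--         # For pos >= 1, odd positions must be 2, even positions must be 0.
--         return 2 if pos % 2 == 1 else 0
--
--     max_length = 0
--
--     # Iterate over all cells
--     for i in range(n):
--         for j in range(m):
--             # Only start if the cell's value is 1 (pattern must start with 1)
--             if matrix[i][j] != 1:
--                 continue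
--
--             # For each of the four diagonal directions
--             for dx, dy in directions:
--                 # Start simulation from (i, j)
--                 curr_i, curr_j = i, j
--                 seg_length = 1  # we have matched the first element (1)
--
--                 # We continue extending the segment until we break due to out-of-bound or mismatch.
--                 while True:
--                     next_i = curr_i + dx
--                     next_j = curr_j + dy
--                     # If next cell is out-of-bound, then the segment ends here.
--                     if not in_bounds(next_i, next_j):
--                         # Valid segment only if the last cell is on border.
--                         if is_border(curr_i, curr_j):
--                             max_length = max(max_length, seg_length)
--                         break
--
--                     # Determine the expected value at the next position in the segment.
--                     exp_val = expected_value(seg_length)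
--                     if matrix[next_i][next_j] != exp_val:
--                         # If pattern mismatches, segment ends.
--                         # Only record it if the last valid cell is on border.
--                         if is_border(curr_i, curr_j):
--                             max_length = max(max_length, seg_length)
--                         break
--
--                     # Pattern matched: update current position and segment length.
--                     curr_i, curr_j = next_i, next_j
--                     seg_length += 1
--
--                     # If the new current cell is on border and the next step is out-of-bound,
--                     # then in the next iteration we'll exit. But we can also record here if desired.
--                     # However, we record only when the segment terminates.
--
--     return max_length
-- ===== SOURCE B (Python) =====
-- def solution(matrix):
--     if not matrix or not matrix[0]:
--         return 0
--
--     n = len(matrix)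
--     m = len(matrix[0])
--     directions = [(1, 1), (1, -1), (-1, 1), (-1, -1)]
--
--     # Phase 1: for each direction d, precompute table2[i][j] = length of the
--     # alternating 2,0,2,0,... run starting at (i,j) in direction d, by a
--     # row-by-row DP against the direction (a zero row stands for out-of-bounds).
--     tables = {}
--     for dx, dy in directions:
--         rows = range(n - 1, -1, -1) if dx == 1 else range(n)
--         acc = []
--         prev2 = [0] * m
--         prev0 = [0] * m
--         for i in rows:
--             row = matrix[i]
--             cur2 = [(1 + (prev0[j + dy] if 0 <= j + dy < m else 0)) if row[j] == 2 else 0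
--                     for j in range(m)]
--             cur0 = [(1 + (prev2[j + dy] if 0 <= j + dy < m else 0)) if row[j] == 0 else 0
--                     for j in range(m)]
--             acc.append(cur2)
--             prev2, prev0 = cur2, cur0
--         tables[(dx, dy)] = acc[::-1] if dx == 1 else acc
--
--     # Phase 2: each 1-cell extends by the precomputed chain length; record the
--     # segment if its final cell lies on the border.
--     best = 0
--     for i in range(n):
--         for j in range(m):
--             if matrix[i][j] != 1:
--                 continue
--             for dx, dy in directions:
--                 ni, nj = i + dx, j + dy
--                 c = tables[(dx, dy)][ni][nj] if (0 <= ni < n and 0 <= nj < m) else 0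
--                 L = 1 + c
--                 ei, ej = i + (L - 1) * dx, j + (L - 1) * dy
--                 if ei == 0 or ei == n - 1 or ej == 0 or ej == m - 1:
--                     best = max(best, L)
--     return best
-- ===== Notes on version B (the rewrite author's own statement) =====
-- stated objective: alternative
-- what changed: replaces A's per-1-cell diagonal walk simulation by, per direction, a row-by-row DP table of alternating 2/0 chain lengths, so each 1-cell is extended by an O(1) table lookup instead of a rescan
import Mathlib
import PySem

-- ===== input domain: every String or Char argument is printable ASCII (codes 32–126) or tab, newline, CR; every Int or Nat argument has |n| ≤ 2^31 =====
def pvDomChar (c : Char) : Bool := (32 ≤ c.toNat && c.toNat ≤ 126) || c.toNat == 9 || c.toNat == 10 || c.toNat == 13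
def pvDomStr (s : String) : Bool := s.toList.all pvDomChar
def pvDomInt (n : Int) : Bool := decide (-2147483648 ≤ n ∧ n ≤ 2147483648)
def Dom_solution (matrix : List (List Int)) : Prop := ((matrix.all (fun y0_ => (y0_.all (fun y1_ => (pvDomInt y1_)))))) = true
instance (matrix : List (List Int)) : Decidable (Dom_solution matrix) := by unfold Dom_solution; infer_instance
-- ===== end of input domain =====

-- B replaces A's per-1-cell diagonal walk simulation by per-direction DP tables of
-- alternating 2/0 chain lengths (alternative algorithm; same return value).

-- ===== PORT A =====
-- shared cell/bounds helpers (in-range matrix[i][j]; both Pythons index identically)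
def pvAt (matrix : List (List Int)) (i j : Int) : Int :=
  PySem.List.pyGetD (PySem.List.pyGetD matrix i []) j 0

def pvInb (n m i j : Int) : Bool := decide (0 ≤ i ∧ i < n ∧ 0 ≤ j ∧ j < m)

def pvBorder (n m i j : Int) : Bool := decide (i = 0 ∨ i = n - 1 ∨ j = 0 ∨ j = m - 1)

def pvExpected (pos : Int) : Int :=
  if pos = 0 then 1 else if PySem.Int.mod pos 2 = 1 then 2 else 0

-- A's `while True` walk; fuel matrix.length+1 strictly bounds the iteration count
-- (each continuing step moves the row index by ±1 staying inside [0, n)).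
def pvLoopA (matrix : List (List Int)) (n m dx dy : Int) :
    Nat → Int → Int → Int → Int → Int
  | 0, _, _, _, best => best
  | f+1, ci, cj, seg, best =>
    if pvInb n m (ci+dx) (cj+dy) = false then
      (if pvBorder n m ci cj then max best seg else best)
    else if pvAt matrix (ci+dx) (cj+dy) ≠ pvExpected seg then
      (if pvBorder n m ci cj then max best seg else best)
    else pvLoopA matrix n m dx dy f (ci+dx) (cj+dy) (seg+1) best

def pvDirs : List (Int × Int) := [(1,1),(1,-1),(-1,1),(-1,-1)]

def solution (matrix : List (List Int)) : Int :=
  match matrix with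
  | [] => 0
  | r0 :: _ =>
    if r0.length = 0 then 0 else
    let n : Int := matrix.length
    let m : Int := r0.length
    (PySem.List.pyRange 0 n 1).foldl (fun best i =>
      (PySem.List.pyRange 0 m 1).foldl (fun best j =>
        if pvAt matrix i j ≠ 1 then best
        else pvDirs.foldl (fun best d =>
          pvLoopA matrix n m d.1 d.2 (matrix.length + 1) i j 1 best) best) best) 0

-- ===== PORT B =====
-- loop body of B's phase-1 row DP (one matrix row; a zero row stands for out-of-bounds)
def pvStep (matrix : List (List Int)) (m dy : Int)
    (st : List (List Int) × List Int × List Int) (i : Int) :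
    List (List Int) × List Int × List Int :=
  let row := PySem.List.pyGetD matrix i []
  let cur2 := (PySem.List.pyRange 0 m 1).map (fun j =>
    if PySem.List.pyGetD row j 0 = 2 then
      1 + (if 0 ≤ j + dy ∧ j + dy < m then PySem.List.pyGetD st.2.2 (j + dy) 0 else 0)
    else 0)
  let cur0 := (PySem.List.pyRange 0 m 1).map (fun j =>
    if PySem.List.pyGetD row j 0 = 0 then
      1 + (if 0 ≤ j + dy ∧ j + dy < m then PySem.List.pyGetD st.2.1 (j + dy) 0 else 0)
    else 0)
  (st.1 ++ [cur2], cur2, cur0)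

-- chain2 table of one direction: chain2[i][j] = length of the 2,0,2,0,... run from (i,j)
def pvBuildDir (matrix : List (List Int)) (n m dx dy : Int) : List (List Int) :=
  let rows := if dx = 1 then PySem.List.pyRange (n-1) (-1) (-1) else PySem.List.pyRange 0 n 1
  let st := rows.foldl (pvStep matrix m dy)
    ([], List.replicate m.toNat 0, List.replicate m.toNat 0)
  if dx = 1 then st.1.reverse else st.1

def solution_alt (matrix : List (List Int)) : Int :=
  match matrix with
  | [] => 0
  | r0 :: _ =>
    if r0.length = 0 then 0 else
    let n : Int := matrix.length
    let m : Int := r0.length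
    let tables : PySem.Dict (Int × Int) (List (List Int)) :=
      pvDirs.foldl (fun t d => t.insert d (pvBuildDir matrix n m d.1 d.2)) PySem.Dict.empty
    (PySem.List.pyRange 0 n 1).foldl (fun best i =>
      (PySem.List.pyRange 0 m 1).foldl (fun best j =>
        if pvAt matrix i j ≠ 1 then best
        else pvDirs.foldl (fun best d =>
          let c := if pvInb n m (i + d.1) (j + d.2) = true then
              PySem.List.pyGetD (PySem.List.pyGetD (tables.getD d []) (i + d.1) []) (j + d.2) 0
            else 0
          let L := 1 + c
          if pvBorder n m (i + (L-1)*d.1) (j + (L-1)*d.2) then max best L else best) best) best) 0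

-- ===== PRECONDITION & SPEC =====
-- Pre_ excludes ragged matrices (a later row shorter than the first): there both
-- Pythons raise IndexError.
def Pre_solution (matrix : List (List Int)) : Prop :=
  ∀ row ∈ matrix, (matrix.headD []).length ≤ row.length
instance (matrix : List (List Int)) : Decidable (Pre_solution matrix) := by
  unfold Pre_solution; infer_instance

def pvWitness_solution : List (List Int) := [[1, 2], [0, 0]]

def Spec_solution (matrix : List (List Int)) (out : Int) : Prop := out = solution_alt matrix
instance (matrix : List (List Int)) (out : Int) : Decidable (Spec_solution matrix out) := by
  unfold Spec_solution; infer_instance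

-- ===== CLAIM (what is proved, stated in full; the proofs are below) =====
def Claim_equal_solution : Prop := ∀ (matrix : List (List Int)), Dom_solution matrix → Pre_solution matrix → Spec_solution matrix (solution matrix)

-- ===== LEMMAS AND PROOFS =====

-- fuelled specification of the alternating chain along one diagonal
def pvChF (matrix : List (List Int)) (n m dx dy v : Int) : Nat → Int → Int → Int
  | 0, _, _ => 0
  | f+1, i, j =>
    if pvInb n m i j = true ∧ pvAt matrix i j = v then
      1 + pvChF matrix n m dx dy (2 - v) f (i+dx) (j+dy)
    else 0

def pvMeas (n dx i : Int) : Nat := if dx = 1 then (n - i).toNat else (i + 1).toNat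

lemma pvChF_oob (matrix : List (List Int)) (n m dx dy v : Int) (f : Nat) (i j : Int)
    (h : pvInb n m i j = false) : pvChF matrix n m dx dy v f i j = 0 := by
  cases f <;> simp [pvChF, h]

lemma pvInb_meas_pos (n m dx i j : Int) (h : pvInb n m i j = true) :
    1 ≤ pvMeas n dx i := by
  simp only [pvInb, decide_eq_true_eq] at h
  unfold pvMeas; split <;> omega

lemma pvInb_meas_step (n m dx i j : Int) (hdx : dx = 1 ∨ dx = -1)
    (h : pvInb n m i j = true) :
    pvMeas n dx (i + dx) + 1 = pvMeas n dx i := by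
  simp only [pvInb, decide_eq_true_eq] at h
  rcases hdx with h1 | h1 <;> subst h1 <;> simp only [pvMeas] <;> norm_num <;> omega

lemma pvChF_stable (matrix : List (List Int)) (n m dx dy : Int)
    (hdx : dx = 1 ∨ dx = -1) :
    ∀ (f g : Nat) (v i j : Int), pvMeas n dx i ≤ f → pvMeas n dx i ≤ g →
      pvChF matrix n m dx dy v f i j = pvChF matrix n m dx dy v g i j := by
  intro f
  induction f with
  | zero =>
    intro g v i j hf hg
    have hoob : pvInb n m i j = false := by
      rcases hdx with h1 | h1 <;> subst h1 <;>
        simp only [pvMeas, if_pos] at hf <;>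
        simp only [pvInb, decide_eq_false_iff_not] <;> simp_all
    rw [pvChF_oob _ _ _ _ _ _ _ _ _ hoob, pvChF_oob _ _ _ _ _ _ _ _ _ hoob]
  | succ f ih =>
    intro g v i j hf hg
    cases g with
    | zero =>
      have hoob : pvInb n m i j = false := by
        rcases hdx with h1 | h1 <;> subst h1 <;>
          simp only [pvMeas, if_pos] at hg <;>
          simp only [pvInb, decide_eq_false_iff_not] <;> simp_all
      rw [pvChF_oob _ _ _ _ _ _ _ _ _ hoob, pvChF_oob _ _ _ _ _ _ _ _ _ hoob]
    | succ g =>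
      simp only [pvChF]
      by_cases h : pvInb n m i j = true ∧ pvAt matrix i j = v
      · simp only [if_pos h]
        have hstep := pvInb_meas_step n m dx i j hdx h.1
        have := ih g (2 - v) (i + dx) (j + dy) (by omega) (by omega)
        omega
      · simp only [if_neg h]

def pvChain (matrix : List (List Int)) (n m dx dy v i j : Int) : Int :=
  pvChF matrix n m dx dy v (n.toNat + 1) i j

lemma pvChain_oob (matrix : List (List Int)) (n m dx dy v i j : Int)
    (h : pvInb n m i j = false) : pvChain matrix n m dx dy v i j = 0 :=
  pvChF_oob _ _ _ _ _ _ _ _ _ h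

lemma pvChain_unfold (matrix : List (List Int)) (n m dx dy v i j : Int)
    (hdx : dx = 1 ∨ dx = -1) (hij : pvInb n m i j = true) :
    pvChain matrix n m dx dy v i j =
      if pvAt matrix i j = v then 1 + pvChain matrix n m dx dy (2 - v) (i+dx) (j+dy) else 0 := by
  have hb : pvMeas n dx (i + dx) ≤ n.toNat := by
    have := pvInb_meas_step n m dx i j hdx hij
    have h2 : pvMeas n dx i ≤ n.toNat + 1 := by
      simp only [pvInb, decide_eq_true_eq] at hij
      unfold pvMeas; split <;> omega
    omega
  unfold pvChain
  by_cases hv : pvAt matrix i j = v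
  · conv_lhs => rw [pvChF]
    rw [if_pos (And.intro hij hv), if_pos hv,
      pvChF_stable matrix n m dx dy hdx n.toNat (n.toNat + 1) (2 - v) (i + dx) (j + dy) hb
        (by omega)]
  · conv_lhs => rw [pvChF]
    rw [if_neg (fun h => hv h.2), if_neg hv]

def pvV (seg : Int) : Int := if seg % 2 = 1 then 2 else 0

lemma pvExpected_pos (seg : Int) (h : 1 ≤ seg) : pvExpected seg = pvV seg := by
  unfold pvExpected pvV
  rw [PySem.Int.mod_eq_emod_of_pos (by norm_num), if_neg (by omega)]

lemma pvV_flip (seg : Int) : 2 - pvV seg = pvV (seg + 1) := by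
  unfold pvV; split_ifs <;> omega

lemma pvLoopA_eq (matrix : List (List Int)) (n m dx dy : Int)
    (hdx : dx = 1 ∨ dx = -1) :
    ∀ (f : Nat) (ci cj seg best : Int), 1 ≤ seg →
      (pvInb n m (ci+dx) (cj+dy) = true → pvMeas n dx (ci+dx) ≤ f) →
      pvLoopA matrix n m dx dy (f+1) ci cj seg best =
        (let c := pvChF matrix n m dx dy (pvV seg) f (ci+dx) (cj+dy)
         if pvBorder n m (ci + c*dx) (cj + c*dy) then max best (seg + c) else best) := by
  intro f
  induction f with
  | zero =>
    intro ci cj seg best hseg hmeas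
    have hnb : pvInb n m (ci+dx) (cj+dy) = false := by
      cases h : pvInb n m (ci+dx) (cj+dy)
      · rfl
      · exact absurd (hmeas h) (by have := pvInb_meas_pos n m dx (ci+dx) (cj+dy) h; omega)
    simp [pvLoopA, hnb, pvChF]
  | succ f ih =>
    intro ci cj seg best hseg hmeas
    cases hnb : pvInb n m (ci+dx) (cj+dy) with
    | false =>
      rw [pvChF_oob _ _ _ _ _ _ _ _ _ hnb]
      simp [pvLoopA, hnb]
    | true =>
      have hexp : pvExpected seg = pvV seg := pvExpected_pos seg hseg
      by_cases hv : pvAt matrix (ci+dx) (cj+dy) = pvExpected seg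
      · have step : pvLoopA matrix n m dx dy (f+1+1) ci cj seg best =
            pvLoopA matrix n m dx dy (f+1) (ci+dx) (cj+dy) (seg+1) best := by
          simp [pvLoopA, hnb, hv]
        have hmeas' : pvInb n m (ci+dx+dx) (cj+dy+dy) = true →
            pvMeas n dx (ci+dx+dx) ≤ f := by
          intro _
          have := pvInb_meas_step n m dx (ci+dx) (cj+dy) hdx hnb
          have := hmeas hnb
          omega
        rw [step, ih (ci+dx) (cj+dy) (seg+1) best (by omega) hmeas']
        have hch : pvChF matrix n m dx dy (pvV seg) (f+1) (ci+dx) (cj+dy) =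
            1 + pvChF matrix n m dx dy (pvV (seg+1)) f (ci+dx+dx) (cj+dy+dy) := by
          have hv' : pvAt matrix (ci+dx) (cj+dy) = pvV seg := by rw [hv, hexp]
          simp only [pvChF, if_pos (And.intro hnb hv'), pvV_flip]
        simp only [hch]
        set c' := pvChF matrix n m dx dy (pvV (seg+1)) f (ci+dx+dx) (cj+dy+dy) with hc'
        have e1 : ci + dx + c'*dx = ci + (1+c')*dx := by ring
        have e2 : cj + dy + c'*dy = cj + (1+c')*dy := by ring
        have e3 : seg + 1 + c' = seg + (1+c') := by ring
        simp only [e1, e2, e3]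
      · have hch : pvChF matrix n m dx dy (pvV seg) (f+1) (ci+dx) (cj+dy) = 0 := by
          have hv' : ¬ pvAt matrix (ci+dx) (cj+dy) = pvV seg := by rw [← hexp]; exact hv
          simp only [pvChF, hv', and_false, if_false]
        rw [hch]
        simp [pvLoopA, hnb, hv]

lemma pvLoopA_chain (matrix : List (List Int)) (m dx dy i j best : Int)
    (hdx : dx = 1 ∨ dx = -1) :
    pvLoopA matrix (matrix.length) m dx dy (matrix.length + 1) i j 1 best =
      (let c := pvChain matrix (matrix.length) m dx dy 2 (i+dx) (j+dy)
       if pvBorder (matrix.length) m (i + c*dx) (j + c*dy) then max best (1 + c) else best) := by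
  have hm : pvInb (matrix.length) m (i+dx) (j+dy) = true →
      pvMeas (matrix.length) dx (i+dx) ≤ matrix.length := by
    intro h
    simp only [pvInb, decide_eq_true_eq] at h
    unfold pvMeas; split <;> omega
  rw [pvLoopA_eq matrix (matrix.length) m dx dy hdx matrix.length i j 1 best (by norm_num) hm]
  have hv1 : pvV 1 = 2 := by decide
  have hc : pvChF matrix (matrix.length) m dx dy (pvV 1) matrix.length (i+dx) (j+dy) =
      pvChain matrix (matrix.length) m dx dy 2 (i+dx) (j+dy) := by
    rw [hv1]; unfold pvChain
    cases hb : pvInb (matrix.length) m (i+dx) (j+dy) with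
    | false => rw [pvChF_oob _ _ _ _ _ _ _ _ _ hb, pvChF_oob _ _ _ _ _ _ _ _ _ hb]
    | true =>
      apply pvChF_stable matrix _ m dx dy hdx
      · exact hm hb
      · have := hm hb; simp only [Int.toNat_natCast]; omega
  simp only [hc]

-- row of chain values
def pvChRow (matrix : List (List Int)) (n m dx dy v i : Int) : List Int :=
  (PySem.List.pyRange 0 m 1).map (fun j => pvChain matrix n m dx dy v i j)

lemma pvChRow_zero (matrix : List (List Int)) (n m dx dy v r : Int)
    (h : ∀ j : Int, pvInb n m r j = false) :
    List.replicate m.toNat 0 = pvChRow matrix n m dx dy v r := by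
  symm
  unfold pvChRow
  rw [List.eq_replicate_iff]
  constructor
  · simp [PySem.List.length_pyRange_one]
  · intro b hb
    simp only [List.mem_map] at hb
    obtain ⟨j, _, rfl⟩ := hb
    exact pvChain_oob matrix n m dx dy v r j (h j)

lemma pvStep_spec (matrix : List (List Int)) (n m dx dy i : Int)
    (hdx : dx = 1 ∨ dx = -1) (hi : 0 ≤ i) (hi2 : i < n) (acc : List (List Int)) :
    pvStep matrix m dy
      (acc, pvChRow matrix n m dx dy 2 (i+dx), pvChRow matrix n m dx dy 0 (i+dx)) i
    = (acc ++ [pvChRow matrix n m dx dy 2 i],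
       pvChRow matrix n m dx dy 2 i, pvChRow matrix n m dx dy 0 i) := by
  have key : ∀ v w : Int, 2 - v = w →
      ((PySem.List.pyRange 0 m 1).map (fun j =>
        if PySem.List.pyGetD (PySem.List.pyGetD matrix i []) j 0 = v then
          1 + (if 0 ≤ j + dy ∧ j + dy < m then
            PySem.List.pyGetD (pvChRow matrix n m dx dy w (i+dx)) (j + dy) 0 else 0)
        else 0))
      = pvChRow matrix n m dx dy v i := by
    intro v w hw
    subst hw
    unfold pvChRow
    apply List.map_congr_left
    intro j hj
    rw [PySem.List.mem_pyRange_one] at hj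
    have hij : pvInb n m i j = true := by
      simp only [pvInb, decide_eq_true_eq]; omega
    have hat : PySem.List.pyGetD (PySem.List.pyGetD matrix i []) j 0 = pvAt matrix i j := rfl
    rw [hat, pvChain_unfold matrix n m dx dy v i j hdx hij]
    by_cases hv : pvAt matrix i j = v
    · rw [if_pos hv, if_pos hv]
      congr 1
      by_cases hcol : 0 ≤ j + dy ∧ j + dy < m
      · rw [if_pos hcol, PySem.List.pyGetD_map_pyRange_of_nonneg _ _ _ _ hcol.1 hcol.2]
      · rw [if_neg hcol, pvChain_oob matrix n m dx dy (2-v) (i+dx) (j+dy)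
          (by simp only [pvInb, decide_eq_false_iff_not]; omega)]
    · rw [if_neg hv, if_neg hv]
  have h2 := key 2 0 (by norm_num)
  have h0 := key 0 2 (by norm_num)
  simp only [pvStep]
  rw [h2, h0]

lemma pvFold_desc (matrix : List (List Int)) (n m dy : Int) :
    ∀ (k : Nat) (r : Int) (acc : List (List Int)), r = (k : Int) - 1 → r < n →
      List.foldl (pvStep matrix m dy)
        (acc, pvChRow matrix n m 1 dy 2 (r+1), pvChRow matrix n m 1 dy 0 (r+1))
        (PySem.List.pyRange r (-1) (-1))
      = (acc ++ (PySem.List.pyRange r (-1) (-1)).map (pvChRow matrix n m 1 dy 2),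
         pvChRow matrix n m 1 dy 2 0, pvChRow matrix n m 1 dy 0 0) := by
  intro k
  induction k with
  | zero =>
    intro r acc hr hrn
    have : r = -1 := by omega
    subst this
    rw [PySem.List.pyRange_neg_one_eq_nil (by norm_num)]
    simp
  | succ k ih =>
    intro r acc hr hrn
    have hr0 : 0 ≤ r := by omega
    rw [PySem.List.pyRange_neg_one_cons (by omega : (-1:Int) < r)]
    simp only [List.foldl_cons, List.map_cons]
    have hstep := pvStep_spec matrix n m 1 dy r (Or.inl rfl) hr0 hrn acc
    rw [hstep]
    have e : r = (r - 1) + 1 := by ring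
    rw [show pvChRow matrix n m 1 dy 2 r = pvChRow matrix n m 1 dy 2 ((r-1)+1) by rw [← e],
        show pvChRow matrix n m 1 dy 0 r = pvChRow matrix n m 1 dy 0 ((r-1)+1) by rw [← e]]
    rw [ih (r-1) (acc ++ [pvChRow matrix n m 1 dy 2 ((r-1)+1)]) (by omega) (by omega)]
    rw [← e]
    simp [List.append_assoc]

lemma pvFold_asc (matrix : List (List Int)) (n m dy : Int) :
    ∀ (k : Nat) (r : Int) (acc : List (List Int)), r = n - (k : Int) → 0 ≤ r →
      List.foldl (pvStep matrix m dy)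
        (acc, pvChRow matrix n m (-1) dy 2 (r-1), pvChRow matrix n m (-1) dy 0 (r-1))
        (PySem.List.pyRange r n 1)
      = (acc ++ (PySem.List.pyRange r n 1).map (pvChRow matrix n m (-1) dy 2),
         pvChRow matrix n m (-1) dy 2 (n-1), pvChRow matrix n m (-1) dy 0 (n-1)) := by
  intro k
  induction k with
  | zero =>
    intro r acc hr hr0
    have : r = n := by omega
    subst this
    rw [PySem.List.pyRange_one_eq_nil (by omega)]
    simp
  | succ k ih =>
    intro r acc hr hr0
    have hrn : r < n := by omega
    rw [PySem.List.pyRange_one_cons hrn]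
    simp only [List.foldl_cons, List.map_cons]
    have hstep : pvStep matrix m dy
        (acc, pvChRow matrix n m (-1) dy 2 (r + (-1)), pvChRow matrix n m (-1) dy 0 (r + (-1))) r
      = (acc ++ [pvChRow matrix n m (-1) dy 2 r],
         pvChRow matrix n m (-1) dy 2 r, pvChRow matrix n m (-1) dy 0 r) :=
      pvStep_spec matrix n m (-1) dy r (Or.inr rfl) hr0 hrn acc
    rw [show r - 1 = r + (-1) by ring, hstep]
    rw [show pvChRow matrix n m (-1) dy 2 r = pvChRow matrix n m (-1) dy 2 ((r+1)-1) by norm_num,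
        show pvChRow matrix n m (-1) dy 0 r = pvChRow matrix n m (-1) dy 0 ((r+1)-1) by norm_num]
    rw [ih (r+1) (acc ++ [pvChRow matrix n m (-1) dy 2 ((r+1)-1)]) (by omega) (by omega)]
    norm_num

lemma pvBuildDir_spec (matrix : List (List Int)) (n m dx dy : Int)
    (hn : 0 ≤ n) (hdx : dx = 1 ∨ dx = -1) (i j : Int)
    (hi : 0 ≤ i) (hi2 : i < n) (hj : 0 ≤ j) (hj2 : j < m) :
    PySem.List.pyGetD (PySem.List.pyGetD (pvBuildDir matrix n m dx dy) i []) j 0 =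
      pvChain matrix n m dx dy 2 i j := by
  have hrowget : ∀ T : List (List Int), T = (PySem.List.pyRange 0 n 1).map (pvChRow matrix n m dx dy 2) →
      PySem.List.pyGetD (PySem.List.pyGetD T i []) j 0 = pvChain matrix n m dx dy 2 i j := by
    intro T hT
    rw [hT, PySem.List.pyGetD_map_pyRange_of_nonneg _ _ _ _ hi hi2]
    unfold pvChRow
    rw [PySem.List.pyGetD_map_pyRange_of_nonneg _ _ _ _ hj hj2]
  apply hrowget
  rcases hdx with h1 | h1 <;> subst h1
  · -- dx = 1 : descending rows, then reverse
    have hz2 : List.replicate m.toNat (0:Int) = pvChRow matrix n m 1 dy 2 n :=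
      pvChRow_zero matrix n m 1 dy 2 n
        (by intro j; simp only [pvInb, decide_eq_false_iff_not]; omega)
    have hz0 : List.replicate m.toNat (0:Int) = pvChRow matrix n m 1 dy 0 n :=
      pvChRow_zero matrix n m 1 dy 0 n
        (by intro j; simp only [pvInb, decide_eq_false_iff_not]; omega)
    have hinit : (([] : List (List Int)), List.replicate m.toNat (0:Int),
        List.replicate m.toNat (0:Int)) =
        ([], pvChRow matrix n m 1 dy 2 ((n-1)+1), pvChRow matrix n m 1 dy 0 ((n-1)+1)) := by
      rw [show (n-1)+1 = n by ring, ← hz2, ← hz0]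
    simp only [pvBuildDir, reduceIte]
    rw [hinit, pvFold_desc matrix n m dy n.toNat (n-1) [] (by omega) (by omega)]
    simp only [List.nil_append]
    rw [PySem.List.pyRange_neg_one_eq_reverse,
        show ((-1:Int)+1) = 0 by norm_num, show (n-1)+1 = n by ring,
        List.map_reverse, List.reverse_reverse]
  · -- dx = -1 : ascending rows
    have hz2 : List.replicate m.toNat (0:Int) = pvChRow matrix n m (-1) dy 2 (0-1) :=
      pvChRow_zero matrix n m (-1) dy 2 (0-1)
        (by intro j; simp only [pvInb, decide_eq_false_iff_not]; omega)
    have hz0 : List.replicate m.toNat (0:Int) = pvChRow matrix n m (-1) dy 0 (0-1) :=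
      pvChRow_zero matrix n m (-1) dy 0 (0-1)
        (by intro j; simp only [pvInb, decide_eq_false_iff_not]; omega)
    have hinit : (([] : List (List Int)), List.replicate m.toNat (0:Int),
        List.replicate m.toNat (0:Int)) =
        ([], pvChRow matrix n m (-1) dy 2 (0-1), pvChRow matrix n m (-1) dy 0 (0-1)) := by
      rw [← hz2, ← hz0]
    have hne : ¬ ((-1:Int) = 1) := by norm_num
    simp only [pvBuildDir, if_neg hne]
    rw [hinit, pvFold_asc matrix n m dy n.toNat 0 [] (by omega) (by norm_num)]
    simp only [List.nil_append]

lemma pvDir_step (matrix : List (List Int)) (m dx dy i j b : Int)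
    (hdx : dx = 1 ∨ dx = -1) :
    pvLoopA matrix (matrix.length) m dx dy (matrix.length + 1) i j 1 b =
      (let c := if pvInb (matrix.length) m (i + dx) (j + dy) = true then
          PySem.List.pyGetD (PySem.List.pyGetD
            (pvBuildDir matrix (matrix.length) m dx dy) (i + dx) []) (j + dy) 0
        else 0
       let L := 1 + c
       if pvBorder (matrix.length) m (i + (L-1)*dx) (j + (L-1)*dy) then max b L else b) := by
  rw [pvLoopA_chain matrix m dx dy i j b hdx]
  have hc : (if pvInb (matrix.length) m (i + dx) (j + dy) = true then
      PySem.List.pyGetD (PySem.List.pyGetD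
        (pvBuildDir matrix (matrix.length) m dx dy) (i + dx) []) (j + dy) 0
    else 0) = pvChain matrix (matrix.length) m dx dy 2 (i+dx) (j+dy) := by
    cases hb : pvInb (matrix.length) m (i + dx) (j + dy) with
    | false => rw [if_neg (by simp), pvChain_oob _ _ _ _ _ _ _ _ hb]
    | true =>
      rw [if_pos rfl]
      have hb' := hb
      simp only [pvInb, decide_eq_true_eq] at hb'
      exact pvBuildDir_spec matrix (matrix.length) m dx dy (by omega) hdx (i+dx) (j+dy)
        hb'.1 hb'.2.1 hb'.2.2.1 hb'.2.2.2
  simp only [hc]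
  have e : (1 : Int) + pvChain matrix (matrix.length) m dx dy 2 (i+dx) (j+dy) - 1 =
      pvChain matrix (matrix.length) m dx dy 2 (i+dx) (j+dy) := by ring
  simp only [e]

-- ===== VERDICT (by name: the statement is the Claim_ definition above) =====
theorem solution_spec : Claim_equal_solution := by
  unfold Claim_equal_solution
  intro matrix _ _
  unfold Spec_solution
  cases matrix with
  | nil => rfl
  | cons r0 rest =>
    show solution (r0 :: rest) = solution_alt (r0 :: rest)
    unfold solution solution_alt
    by_cases hm : r0.length = 0
    · simp [hm]
    · simp only [if_neg hm]
      apply PySem.List.foldl_congr_mem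
      intro best i _
      apply PySem.List.foldl_congr_mem
      intro best' j _
      by_cases hcell : pvAt (r0 :: rest) i j ≠ 1
      · rw [if_pos hcell, if_pos hcell]
      · rw [if_neg hcell, if_neg hcell]
        apply PySem.List.foldl_congr_mem
        intro b d hd
        have hget : ∀ dd ∈ pvDirs,
            (PySem.Dict.getD ((pvDirs.foldl (fun t d =>
              t.insert d (pvBuildDir (r0 :: rest) ((r0 :: rest).length) (r0.length) d.1 d.2))
              PySem.Dict.empty)) dd [])
            = pvBuildDir (r0 :: rest) ((r0 :: rest).length) (r0.length) dd.1 dd.2 := by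
          intro dd hdd
          simp only [pvDirs, List.mem_cons, List.not_mem_nil, or_false] at hdd
          rcases hdd with rfl | rfl | rfl | rfl <;>
            simp [pvDirs, List.foldl, PySem.Dict.getD_insert]
        simp only [pvDirs, List.mem_cons, List.not_mem_nil, or_false] at hd
        rcases hd with rfl | rfl | rfl | rfl <;>
        · rw [pvDir_step (r0 :: rest) (r0.length) _ _ i j b (by norm_num)]
          rw [hget _ (by simp [pvDirs])]
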